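-- pv_equiv track=rewrite | github.com/tygoee/mcm-manager | src/common/maven_coords.py | _parse
-- ===== SOURCE A (Python) =====
-- def _parse(arg: str) -> tuple[str, str]:
--     # Split the file extension
--     if '@' in arg:
--         arg, ext = arg.split('@', 1)
--     else:
--         ext = 'jar'
--
--     # Until the third colon, replace
--     # ':' with '/'. Until the
--     # first, also replace '.' with it
--     colons = 0
--     folder = ''
--     for char in arg:
--         if colons == 3:
--             break
--         if char == ':':
--             colons += 1
--             char = '/'
--         elif char == '.' and colons == 0:
--             char = '/'
--         folder += char
--
--     if not folder[-1] == '/':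
--         folder += '/'
--
--     # Select everything from the first
--     # colon and replace ':' with '-'
--     file = ''
--     for char in arg[arg.find(':')+1:]:
--         if char == ':':
--             char = '-'
--         file += char
--
--     # Add the file extension
--     file += '.' + ext
--
--     return folder, file
-- ===== SOURCE B (Python) =====
-- def _parse(arg: str) -> tuple[str, str]:
--     # Split off the extension after the first '@' (default 'jar')
--     if '@' in arg:
--         base, ext = arg.split('@', 1)
--     else:
--         base, ext = arg, 'jar'
--
--     parts = base.split(':')
--
--     # folder: group with dots as slashes, then up to two coordinates;
--     # a third colon always contributes a trailing slash
--     folder = '/'.join([parts[0].replace('.', '/')] + parts[1:3])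
--     if len(parts) > 3:
--         folder += '/'
--     elif folder[-1] != '/':
--         folder += '/'
--
--     # file: everything after the first colon joined with '-', or the
--     # whole base if there is no colon
--     file = '-'.join(parts[1:]) if len(parts) > 1 else base
--
--     return folder, file + '.' + ext
-- ===== Notes on version B (the rewrite author's own statement) =====
-- stated objective: simpler
-- what changed: Replaces A's two char-by-char accumulator loops (with a colon counter and a break) by a split(':')/replace/join decomposition: folder is '/'.join of the dot-expanded group plus parts[1:3] (a third colon adds the trailing slash), file is '-'.join(parts[1:]) or the whole base.
-- outside the precondition, e.g. on _parse('@'): A raises IndexError, B raises IndexError; on _parse(''): A raises IndexError, B raises IndexError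
import Mathlib
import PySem

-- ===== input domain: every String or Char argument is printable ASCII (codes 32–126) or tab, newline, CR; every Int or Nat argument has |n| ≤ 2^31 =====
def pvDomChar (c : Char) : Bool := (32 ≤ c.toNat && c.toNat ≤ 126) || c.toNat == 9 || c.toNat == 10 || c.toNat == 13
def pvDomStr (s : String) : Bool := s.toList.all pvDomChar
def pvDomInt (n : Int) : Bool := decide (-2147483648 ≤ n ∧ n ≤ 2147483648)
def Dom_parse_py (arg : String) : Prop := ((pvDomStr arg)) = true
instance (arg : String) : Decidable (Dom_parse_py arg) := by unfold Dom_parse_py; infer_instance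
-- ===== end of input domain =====

-- B replaces A's two char-by-char accumulator loops by a split(':')/replace/join decomposition (objective: simpler).


-- ===== PORT A =====
-- A's folder-building for loop: 'break' once colons == 3; ':' → '/', and '.' → '/' before the first colon
def pvFolderLoop : List Char → Nat → List Char
  | [], _ => []
  | c :: rest, colons =>
    if colons == 3 then []
    else if c == ':' then '/' :: pvFolderLoop rest (colons + 1)
    else if c == '.' && colons == 0 then '/' :: pvFolderLoop rest colons
    else c :: pvFolderLoop rest colons

-- A's file-building for loop: ':' → '-'
def pvFileLoop : List Char → List Char
  | [] => []
  | c :: rest => (if c == ':' then '-' else c) :: pvFileLoop rest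

def parse_py (arg : String) : String × String :=
  let be : String × String :=
    if PySem.Str.isIn "@" arg then
      -- '@' occurs in arg, so arg.split('@', 1) is exactly two pieces; the defaults are unreachable
      (((PySem.Str.splitMax? arg "@" 1).getD []).headD arg,
       (((PySem.Str.splitMax? arg "@" 1).getD []).drop 1).headD "jar")
    else (arg, "jar")
  let base := be.1
  let ext := be.2
  let folder := pvFolderLoop base.toList 0
  -- Python's folder[-1] raises IndexError on an empty folder (excluded by Pre_); pyGet? = none falls into the append branch
  let folder := if PySem.List.pyGet? folder (-1) ≠ some '/' then folder ++ ['/'] else folder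
  let file := pvFileLoop (PySem.List.slice base.toList (some (PySem.Str.find base ":" + 1)) none)
  (String.ofList folder, String.ofList (file ++ '.' :: ext.toList))

-- ===== PORT B =====
def parse_py_alt (arg : String) : String × String :=
  let be : String × String :=
    if PySem.Str.isIn "@" arg then
      -- '@' occurs in arg, so arg.split('@', 1) is exactly two pieces; the defaults are unreachable
      (((PySem.Str.splitMax? arg "@" 1).getD []).headD arg,
       (((PySem.Str.splitMax? arg "@" 1).getD []).drop 1).headD "jar")
    else (arg, "jar")
  let base := be.1
  let ext := be.2
  -- base.split(':') with a one-character separator is exactly List.splitOn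
  let parts : List (List Char) := base.toList.splitOn ':'
  -- parts[0].replace('.', '/') with one-character old/new is exactly a character-wise map
  let group := parts.headI.map (fun c => if c == '.' then '/' else c)
  let folder := List.intercalate ['/'] (group :: PySem.List.slice parts (some 1) (some 3))
  -- Python's folder[-1] raises IndexError on an empty folder (excluded by Pre_); pyGet? = none falls into the append branch
  let folder := if 3 < parts.length then folder ++ ['/']
                else if PySem.List.pyGet? folder (-1) ≠ some '/' then folder ++ ['/'] else folder
  let file := if 1 < parts.length then List.intercalate ['-'] (PySem.List.slice parts (some 1) none)
              else base.toList
  (String.ofList folder, String.ofList (file ++ '.' :: ext.toList))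

-- ===== PRECONDITION & SPEC =====
-- Pre_ excludes exactly the inputs where Python A raises IndexError (folder[-1] on an empty folder):
-- the empty string and strings whose part before the first '@' is empty; Python B raises there too.
def Pre_parse_py (arg : String) : Prop := arg.toList ≠ [] ∧ arg.toList.head? ≠ some '@'
instance (arg : String) : Decidable (Pre_parse_py arg) := by unfold Pre_parse_py; infer_instance
def pvWitness_parse_py : String := "org.x:art:1.0"

def Spec_parse_py (arg : String) (out : String × String) : Prop := out = parse_py_alt arg
instance (arg : String) (out : String × String) : Decidable (Spec_parse_py arg out) := by unfold Spec_parse_py; infer_instance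

-- ===== CLAIM (what is proved, stated in full; the proofs are below) =====
def Claim_equal_parse_py : Prop := ∀ (arg : String), Dom_parse_py arg → Pre_parse_py arg → Spec_parse_py arg (parse_py arg)

-- ===== LEMMAS AND PROOFS =====

theorem pvFolderLoop_three (l : List Char) : pvFolderLoop l 3 = [] := by
  cases l <;> simp [pvFolderLoop]

theorem pv_splitOnP_exists (l : List Char) : ∃ p ps, List.splitOnP (· == ':') l = p :: ps := by
  rcases h : List.splitOnP (· == ':') l with _ | ⟨p, ps⟩
  · exact absurd h (List.splitOnP_ne_nil _ l)
  · exact ⟨p, ps, rfl⟩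

theorem pv_inter1 (s a : List Char) : List.intercalate s [a] = a := by
  simp [List.intercalate]

theorem pv_inter2 (s a b : List Char) (t : List (List Char)) :
    List.intercalate s (a :: b :: t) = a ++ s ++ List.intercalate s (b :: t) := by
  simp [List.intercalate, List.intersperse]

theorem pv_interHead (s : List Char) (x : Char) (p : List Char) (rest : List (List Char)) :
    List.intercalate s ((x :: p) :: rest) = x :: List.intercalate s (p :: rest) := by
  cases rest with
  | nil => rw [pv_inter1, pv_inter1]
  | cons q qs => rw [pv_inter2, pv_inter2]; simp

-- '-'.join(l.split(':')) puts a '-' exactly where each ':' was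
theorem pv_join_splitOn (l : List Char) :
    List.intercalate ['-'] (l.splitOn ':') = l.map (fun c => if c == ':' then '-' else c) := by
  induction l with
  | nil => simp [List.splitOn, List.splitOnP_nil, pv_inter1]
  | cons c l ih =>
    simp only [List.splitOn] at *
    rw [List.splitOnP_cons]
    obtain ⟨p, ps, hps⟩ := pv_splitOnP_exists l
    by_cases hc : c = ':'
    · simp [hc, hps] at *
      rw [pv_inter2]
      simpa [hps] using ih
    · simp only [hps] at *
      simp [hc, List.modifyHead, pv_interHead, ih]

theorem pv_fileLoop_map (l : List Char) :
    pvFileLoop l = l.map (fun c => if c == ':' then '-' else c) := by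
  induction l with
  | nil => rfl
  | cons c l ih => simp [pvFileLoop, ih]

theorem pv_pyGet_append_slash (xs : List Char) :
    PySem.List.pyGet? (xs ++ ['/']) (-1) = some '/' := by
  simp [PySem.List.pyGet?, PySem.List.pyIdx?]

theorem pv_slice13 {α : Type} (xs : List α) :
    PySem.List.slice xs (some 1) (some 3) = xs.tail.take 2 := by
  have := PySem.List.slice_natCast xs 1 3
  norm_num at this; exact this

theorem pv_slice1 {α : Type} (xs : List α) :
    PySem.List.slice xs (some 1) none = xs.tail := by
  have := PySem.List.slice_from xs (a := 1) (by norm_num)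
  norm_num at this; exact this

-- characterisation of A's folder loop in terms of split(':')
theorem pvFolderLoop_eq (l : List Char) (k : Nat) (hk : k < 3) :
    pvFolderLoop l k =
      List.intercalate ['/']
        ((if k = 0 then (l.splitOn ':').headI.map (fun c => if c == '.' then '/' else c)
          else (l.splitOn ':').headI) :: (l.splitOn ':').tail.take (2 - k))
      ++ (if 3 - k < (l.splitOn ':').length then ['/'] else []) := by
  induction l generalizing k with
  | nil =>
    have h1 : 3 - k ≥ 1 := by omega
    simp [pvFolderLoop, List.splitOn, List.splitOnP_nil, pv_inter1]
    omega
  | cons c l ih =>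
    have hk3 : ¬ (k = 3) := by omega
    obtain ⟨p, ps, hps⟩ := pv_splitOnP_exists l
    by_cases hc : c = ':'
    · subst hc
      rw [show pvFolderLoop (':' :: l) k = if k == 3 then []
            else '/' :: pvFolderLoop l (k + 1) by simp [pvFolderLoop]]
      simp only [List.splitOn, List.splitOnP_cons] at *
      rcases Nat.lt_or_ge (k+1) 3 with hlt | hge
      · rw [ih (k+1) hlt]
        have h2 : 2 - k = (2 - (k+1)) + 1 := by omega
        have e1 : ((k == 3) : Bool) = false := by simp [hk3]
        have hiff : (3 - (k+1) < ps.length + 1) = (3 - k < ps.length + 1 + 1) := by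
          simp only [eq_iff_iff]; omega
        simp only [hps, beq_self_eq_true, if_true, List.headI, List.tail, h2,
          List.take_succ_cons, pv_inter2,
          if_neg (by omega : ¬ (k + 1) = 0), List.map_nil, e1, Bool.false_eq_true, if_false,
          ite_self, List.length_cons, List.nil_append, List.cons_append, hiff]
      · have hk2 : k = 2 := by omega
        subst hk2
        rw [pvFolderLoop_three]
        simp [hps, pv_inter1]
    · have e1 : ((k == 3) : Bool) = false := by simp [hk3]
      have e2 : ((c == ':') : Bool) = false := by simp [hc]
      rw [show pvFolderLoop (c :: l) k = if k == 3 then []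
            else if c == ':' then '/' :: pvFolderLoop l (k + 1)
            else if c == '.' && k == 0 then '/' :: pvFolderLoop l k
            else c :: pvFolderLoop l k by simp [pvFolderLoop]]
      simp only [e1, e2, Bool.false_eq_true, if_false]
      rw [ih k hk]
      simp only [List.splitOn, List.splitOnP_cons, e2, Bool.false_eq_true, if_false, hps,
        List.modifyHead, List.headI, List.tail, List.length_cons]
      by_cases hk0 : k = 0
      · subst hk0
        simp only [List.map_cons]
        by_cases hd : c = '.'
        · subst hd; simp
          rw [pv_interHead, List.cons_append]
        · have e3 : ((c == '.') : Bool) = false := by simp [hd]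
          simp [e3]
          rw [pv_interHead, List.cons_append]
      · have e4 : ((k == 0) : Bool) = false := by simp [hk0]
        simp only [if_neg hk0, e4, Bool.and_false, Bool.false_eq_true, if_false]
        rw [pv_interHead, List.cons_append]

theorem pv_file_main_aux (l : List Char) (hm : ':' ∈ l) :
    ∃ j : Nat, PySem.Chars.find l [':'] = (j : Int) ∧ j < l.length ∧
      l.drop j = ':' :: l.drop (j+1) ∧
      List.splitOn ':' l = l.take j :: List.splitOn ':' (l.drop (j+1)) := by
  have hinf : [':'] <:+: l := by
    obtain ⟨s, t, rfl⟩ := List.append_of_mem hm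
    exact ⟨s, t, by simp⟩
  have hfind : 0 ≤ PySem.Chars.find l [':'] := (PySem.Chars.find_nonneg_iff l [':']).mpr hinf
  obtain ⟨hpre, hmin⟩ := PySem.Chars.find_spec hfind
  set j := (PySem.Chars.find l [':']).toNat with hj
  refine ⟨j, by omega, ?_, ?_, ?_⟩
  · by_contra h
    rw [List.drop_eq_nil_of_le (by omega)] at hpre
    simpa using List.prefix_nil.mp hpre
  · obtain ⟨t, ht⟩ := hpre
    have : l.drop (j+1) = (l.drop j).tail := by rw [List.tail_drop]
    rw [this, ← ht]; rfl
  · have hnotin : ∀ x ∈ l.take j, ¬ ((x == ':') = true) := by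
      intro x hx
      obtain ⟨i, hi, hv⟩ := List.getElem_of_mem hx
      have hij : i < j := by simp at hi; omega
      have hgl : l[i]'(by simp at hi; omega) = x := by
        rw [← hv]; exact (List.getElem_take).symm
      intro hx'
      apply hmin i hij
      rw [List.drop_eq_getElem_cons (by simp at hi; omega)]
      have : l[i]'(by simp at hi; omega) = ':' := by rw [hgl]; simpa using hx'
      rw [this]
      exact ⟨_, rfl⟩
    have hl : l = l.take j ++ ':' :: l.drop (j+1) := by
      conv_lhs => rw [← List.take_append_drop j l]
      congr 1
      obtain ⟨t, ht⟩ := hpre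
      have : l.drop (j+1) = (l.drop j).tail := by rw [List.tail_drop]
      rw [this, ← ht]; rfl
    conv_lhs => rw [hl]
    exact List.splitOnP_first _ _ hnotin ':' (by simp) _

-- the folder halves agree
theorem pv_folder_main (l : List Char) :
    (if PySem.List.pyGet? (pvFolderLoop l 0) (-1) ≠ some '/'
     then pvFolderLoop l 0 ++ ['/'] else pvFolderLoop l 0) =
    (if 3 < (l.splitOn ':').length
     then List.intercalate ['/'] (((l.splitOn ':').headI.map (fun c => if c == '.' then '/' else c))
            :: PySem.List.slice (l.splitOn ':') (some 1) (some 3)) ++ ['/']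
     else if PySem.List.pyGet? (List.intercalate ['/'] (((l.splitOn ':').headI.map (fun c => if c == '.' then '/' else c))
            :: PySem.List.slice (l.splitOn ':') (some 1) (some 3))) (-1) ≠ some '/'
     then List.intercalate ['/'] (((l.splitOn ':').headI.map (fun c => if c == '.' then '/' else c))
            :: PySem.List.slice (l.splitOn ':') (some 1) (some 3)) ++ ['/']
     else List.intercalate ['/'] (((l.splitOn ':').headI.map (fun c => if c == '.' then '/' else c))
            :: PySem.List.slice (l.splitOn ':') (some 1) (some 3))) := by
  have hF := pvFolderLoop_eq l 0 (by norm_num)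
  simp only [Nat.sub_zero, reduceIte] at hF
  rw [pv_slice13]
  by_cases hL : 3 < (l.splitOn ':').length
  · rw [if_pos hL]
    rw [if_pos hL] at hF
    rw [hF, pv_pyGet_append_slash]
    simp
  · rw [if_neg hL]
    rw [if_neg hL, List.append_nil] at hF
    rw [hF]

-- the file halves agree
theorem pv_file_main (l : List Char) :
    pvFileLoop (PySem.List.slice l (some (PySem.Chars.find l [':'] + 1)) none) =
    (if 1 < (l.splitOn ':').length
     then List.intercalate ['-'] (PySem.List.slice (l.splitOn ':') (some 1) none)
     else l) := by
  rw [pv_slice1]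
  by_cases hm : ':' ∈ l
  · obtain ⟨j, hjf, hjlen, hdrop, hsplit⟩ := pv_file_main_aux l hm
    have h1 : PySem.List.slice l (some (PySem.Chars.find l [':'] + 1)) none = l.drop (j+1) := by
      rw [hjf, PySem.List.slice_from _ (by omega),
        show ((j : Int) + 1).toNat = j + 1 by omega]
    rw [h1, pv_fileLoop_map, ← pv_join_splitOn, hsplit]
    rw [if_pos (by
      have hne := List.splitOnP_ne_nil (fun x => x == ':') (l.drop (j+1))
      simp only [List.length_cons]
      have hnz : (List.splitOn ':' (l.drop (j+1))).length ≠ 0 := by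
        simpa [List.splitOn, List.length_eq_zero_iff] using hne
      omega)]
    simp
  · have hninf : ¬ [':'] <:+: l := fun h => hm (h.subset (by simp))
    have hfind : PySem.Chars.find l [':'] = -1 := (PySem.Chars.find_eq_neg_one_iff l [':']).mpr hninf
    have hsingle : List.splitOn ':' l = [l] := by
      apply List.splitOnP_eq_single
      intro x hx
      simp only [beq_iff_eq]
      intro h; exact hm (h ▸ hx)
    have h0 : PySem.List.slice l (some (PySem.Chars.find l [':'] + 1)) none = l := by
      rw [hfind, show ((-1 : Int) + 1) = (0 : Int) by norm_num,
        PySem.List.slice_from _ (by norm_num)]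
      simp
    rw [h0, hsingle, pv_fileLoop_map]
    rw [if_neg (by simp)]
    conv_rhs => rw [← List.map_id l]
    apply List.map_congr_left
    intro x hx
    have hxc : ((x == ':') : Bool) = false := by
      simp only [beq_eq_false_iff_ne, ne_eq]
      rintro rfl; exact hm hx
    simp [hxc]

-- ===== VERDICT (by name: the statement is the Claim_ definition above) =====
theorem parse_py_spec : Claim_equal_parse_py := by
  intro arg _ _
  unfold Spec_parse_py parse_py parse_py_alt
  generalize (if PySem.Str.isIn "@" arg then
      (((PySem.Str.splitMax? arg "@" 1).getD []).headD arg,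
       (((PySem.Str.splitMax? arg "@" 1).getD []).drop 1).headD "jar")
    else (arg, "jar")) = be
  obtain ⟨base, ext⟩ := be
  simp only
  refine Prod.ext ?_ ?_ <;> simp only
  · exact congrArg String.ofList (pv_folder_main base.toList)
  · refine congrArg String.ofList (congrArg (· ++ '.' :: ext.toList) ?_)
    simpa using pv_file_main base.toList
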